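-- pv_equiv track=rewrite | github.com/elmoushy/MBTI-Personality-Classification-through-Adapter-Based-Summing-Model | tw.py | replace_repeated_letters
-- ===== SOURCE A (Python) =====
-- def replace_repeated_letters(text):
--
--     words = text.split()
--     new_words = []
--     for word in words:
--         new_word = ""
--         last_char = None
--         count = 0
--         for char in word:
--             if char == last_char:
--                 count += 1
--                 if count <= 2:
--                     new_word += char
--             else:
--                 new_word += char
--                 last_char = char
--                 count = 1
--         new_words.append(new_word)
--     return " ".join(new_words)
-- ===== SOURCE B (Python) =====
-- def replace_repeated_letters(text):
--     new_words = []
--     for word in text.split():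
--         pieces = []
--         i = 0
--         n = len(word)
--         while i < n:
--             j = i
--             while j < n and word[j] == word[i]:
--                 j += 1
--             pieces.append(word[i] * min(j - i, 2))
--             i = j
--         new_words.append("".join(pieces))
--     return " ".join(new_words)
-- ===== Notes on version B (the rewrite author's own statement) =====
-- stated objective: alternative
-- what changed: Replaces A's per-character state machine (last_char/count carried across every character, appending char by char) with run-length grouping: each maximal run of equal characters is located with a two-pointer scan and emitted at once as ch*min(run,2).
import Mathlib
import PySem

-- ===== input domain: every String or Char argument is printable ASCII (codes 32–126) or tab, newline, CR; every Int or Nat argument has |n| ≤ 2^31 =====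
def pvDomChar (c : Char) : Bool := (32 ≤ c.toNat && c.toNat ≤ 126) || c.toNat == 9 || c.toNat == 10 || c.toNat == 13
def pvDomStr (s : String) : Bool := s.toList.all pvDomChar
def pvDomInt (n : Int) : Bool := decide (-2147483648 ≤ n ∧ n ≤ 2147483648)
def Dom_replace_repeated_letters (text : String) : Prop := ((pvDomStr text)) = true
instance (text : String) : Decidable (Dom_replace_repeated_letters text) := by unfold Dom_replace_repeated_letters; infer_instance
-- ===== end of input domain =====

-- B replaces A's per-character last_char/count state machine with run-length grouping
-- (locate each maximal run of equal characters, emit min(run,2) copies at once): alternative, same cost.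

-- ===== PORT A =====
-- inner loop state: (new_word, last_char, count); one step per character, branches in A's order
def pvAStep (st : List Char × Option Char × Nat) (ch : Char) : List Char × Option Char × Nat :=
  match st with
  | (nw, last, count) =>
    if some ch = last then
      if count + 1 ≤ 2 then (nw ++ [ch], last, count + 1) else (nw, last, count + 1)
    else (nw ++ [ch], some ch, 1)

def pvAWord (w : List Char) : List Char :=
  (w.foldl pvAStep ([], none, 0)).1

def replace_repeated_letters (text : String) : String :=
  String.ofList (PySem.Chars.join [' '] ((PySem.Chars.split₀ text.toList).map pvAWord))

-- ===== PORT B =====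
-- per word: find the maximal run at the front (the inner two-pointer scan), emit min(run,2)
-- copies of its character, continue after the run (the outer while)
def pvBCap : List Char → List Char
  | [] => []
  | c :: t =>
    List.replicate (min (1 + (t.takeWhile (· == c)).length) 2) c ++ pvBCap (t.dropWhile (· == c))
termination_by l => l.length
decreasing_by
  simpa using Nat.lt_succ_of_le (List.length_dropWhile_le _ _)

def replace_repeated_letters_alt (text : String) : String :=
  String.ofList (PySem.Chars.join [' '] ((PySem.Chars.split₀ text.toList).map pvBCap))

-- ===== PRECONDITION & SPEC =====
def Spec_replace_repeated_letters (text : String) (out : String) : Prop := out = replace_repeated_letters_alt text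
instance (text : String) (out : String) : Decidable (Spec_replace_repeated_letters text out) := by unfold Spec_replace_repeated_letters; infer_instance

-- ===== CLAIM (what is proved, stated in full; the proofs are below) =====
def Claim_equal_replace_repeated_letters : Prop := ∀ (text : String), Dom_replace_repeated_letters text → Spec_replace_repeated_letters text (replace_repeated_letters text)

-- ===== LEMMAS AND PROOFS =====

-- prepending the run's character to a capped continuation bumps the cap: h·min(m,1) = min(1+m,2) copies
lemma pv_cons_replicate (h : Char) (m : Nat) :
    h :: List.replicate (min m 1) h = List.replicate (min (1 + m) 2) h := by
  rcases m with _ | m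
  · simp
  · have h1 : min (m + 1) 1 = 1 := by omega
    have h2 : min (1 + (m + 1)) 2 = 2 := by omega
    rw [h1, h2]
    rfl

-- invariant of A's inner loop: from state (nw, some c, k) with 1 ≤ k, the fold appends the
-- still-allowed copies of c for the current run, then B's run-capping of the rest
lemma pv_foldA (l : List Char) (nw : List Char) (c : Char) (k : Nat) (hk : 1 ≤ k) :
    (l.foldl pvAStep (nw, some c, k)).1
      = nw ++ List.replicate (min (l.takeWhile (· == c)).length (2 - min k 2)) c
           ++ pvBCap (l.dropWhile (· == c)) := by
  induction l generalizing nw c k with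
  | nil => simp [pvBCap]
  | cons h t ih =>
    by_cases hc : h = c
    · subst hc
      simp only [List.foldl_cons, pvAStep, List.takeWhile_cons, List.dropWhile_cons,
        BEq.rfl, if_pos, List.length_cons]
      by_cases hk2 : k + 1 ≤ 2
      · have hk1 : k = 1 := by omega
        subst hk1
        rw [if_pos (by omega), ih _ _ _ (by omega)]
        have e1 : 2 - min 2 2 = 0 := by omega
        have e2 : min ((t.takeWhile (· == h)).length + 1) (2 - min 1 2) = 1 := by omega
        rw [e1, e2]
        simp
      · rw [if_neg hk2, ih _ _ _ (by omega)]
        have e1 : 2 - min (k + 1) 2 = 0 := by omega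
        have e2 : min ((t.takeWhile (· == h)).length + 1) (2 - min k 2) = 0 := by omega
        rw [e1, e2]
        simp
    · have hbeq : (h == c) = false := by simp [hc]
      rw [List.foldl_cons,
        show pvAStep (nw, some c, k) h = (nw ++ [h], some h, 1) by simp [pvAStep, hc],
        ih _ _ _ (le_refl 1)]
      have e1 : 2 - min 1 2 = 1 := by omega
      rw [e1]
      simp [hbeq, pvBCap, ← pv_cons_replicate]

-- per word, A's state machine and B's run grouping agree
lemma pv_word_eq (w : List Char) : pvAWord w = pvBCap w := by
  cases w with
  | nil => simp [pvAWord, pvBCap]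
  | cons c t =>
    have hstep : pvAStep ([], none, 0) c = ([c], some c, 1) := by
      simp [pvAStep]
    rw [pvAWord, List.foldl_cons, hstep, pv_foldA t [c] c 1 (le_refl 1)]
    have e1 : 2 - min 1 2 = 1 := by omega
    rw [e1, pvBCap, ← pv_cons_replicate]
    simp

-- ===== VERDICT (by name: the statement is the Claim_ definition above) =====
theorem replace_repeated_letters_spec : Claim_equal_replace_repeated_letters := by
  intro text _
  unfold Spec_replace_repeated_letters replace_repeated_letters replace_repeated_letters_alt
  rw [List.map_congr_left (fun w _ => pv_word_eq w)]
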